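-- pv_equiv track=rewrite | github.com/zekenaulty/zekenaulty.github.io | arc.py | build_allowed_dirs_from_files
-- ===== SOURCE A (Python) =====
-- def build_allowed_dirs_from_files(files):
--     """From a set of POSIX file paths, compute all ancestor directories."""
--     allowed = {""}
--     for f in files:
--         parts = f.split("/")
--         cur = []
--         for part in parts[:-1]:  # exclude filename
--             cur.append(part)
--             allowed.add("/".join(cur))
--     return allowed
-- ===== SOURCE B (Python) =====
-- def build_allowed_dirs_from_files(files):
--     """From a set of POSIX file paths, compute all ancestor directories."""
--     allowed = {""}
--     for f in files:
--         for i, ch in enumerate(f):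
--             if ch == "/":
--                 allowed.add(f[:i])
--     return allowed
-- ===== Notes on version B (the rewrite author's own statement) =====
-- stated objective: simpler
-- what changed: Replaces per-path split('/') plus an accumulator list re-joined with '/'.join at every step by a single character scan that adds the prefix f[:i] at each '/' position, eliminating the split/join machinery entirely.
import Mathlib
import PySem

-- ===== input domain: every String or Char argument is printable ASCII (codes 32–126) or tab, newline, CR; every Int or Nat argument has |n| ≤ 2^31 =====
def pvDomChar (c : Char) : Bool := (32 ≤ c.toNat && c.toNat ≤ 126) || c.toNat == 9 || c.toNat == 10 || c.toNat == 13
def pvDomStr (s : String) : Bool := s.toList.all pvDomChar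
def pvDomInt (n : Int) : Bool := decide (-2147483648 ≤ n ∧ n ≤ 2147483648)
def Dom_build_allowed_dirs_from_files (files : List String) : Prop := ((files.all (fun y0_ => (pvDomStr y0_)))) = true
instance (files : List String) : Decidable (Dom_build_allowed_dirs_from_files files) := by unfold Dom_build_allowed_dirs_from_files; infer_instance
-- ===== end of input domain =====

-- B replaces split('/')+incremental '/'.join by a character scan adding the prefix f[:i] at each '/'; return values proved equal.

-- ===== PORT A =====
-- f.split("/"): sep is the literal "/" (never empty), so PySem.Str.split? always returns some; .getD [] is exact here.
def build_allowed_dirs_from_files (files : List String) : List String :=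
  files.foldl
    (fun allowed f =>
      let parts := (PySem.Str.split? f "/").getD []
      ((PySem.List.slice parts none (some (-1))).foldl
        (fun (st : List String × PySem.Set String) part =>
          let cur := st.1 ++ [part]
          (cur, PySem.Set.add st.2 (PySem.Str.join "/" cur)))
        ([], allowed)).2)
    (PySem.Set.ofList [""])

-- ===== PORT B =====
def build_allowed_dirs_from_files_alt (files : List String) : List String :=
  files.foldl
    (fun allowed f =>
      (PySem.List.enumerate f.toList 0).foldl
        (fun al (p : Int × Char) =>
          if p.2 == '/' then PySem.Set.add al (PySem.Str.slice f none (some p.1)) else al)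
        allowed)
    (PySem.Set.ofList [""])

-- ===== PRECONDITION & SPEC =====
def Spec_build_allowed_dirs_from_files (files : List String) (out : List String) : Prop := out = build_allowed_dirs_from_files_alt files
instance (files : List String) (out : List String) : Decidable (Spec_build_allowed_dirs_from_files files out) := by unfold Spec_build_allowed_dirs_from_files; infer_instance

-- ===== CLAIM (what is proved, stated in full; the proofs are below) =====
def Claim_equal_build_allowed_dirs_from_files : Prop := ∀ (files : List String), Dom_build_allowed_dirs_from_files files → Spec_build_allowed_dirs_from_files files (build_allowed_dirs_from_files files)

-- ===== LEMMAS AND PROOFS =====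

/-- Structural single-'/' splitter: `splitSlash pre cs` models Python's split('/')
with `pre` the accumulated current piece (a reasoning model for `PySem.Chars.splitOn`). -/
def splitSlash (pre : List Char) : List Char → List (List Char)
  | [] => [pre]
  | c :: rest => if c = '/' then pre :: splitSlash [] rest else splitSlash (pre ++ [c]) rest

/-- Indices (from 0) of the '/' characters of a char list, in order. -/
def slashIdx : List Char → List Nat
  | [] => []
  | c :: rest =>
    if c = '/' then 0 :: (slashIdx rest).map (· + 1) else (slashIdx rest).map (· + 1)

/-- The strings A's inner loop adds (as char lists), given the remaining parts and current `cur`. -/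
def addsAc : List (List Char) → List (List Char) → List (List Char)
  | [], _ => []
  | p :: ps, cur => PySem.Chars.join ['/'] (cur ++ [p]) :: addsAc ps (cur ++ [p])

/-- `cur` flattened back with a trailing '/' (empty for empty `cur`). -/
def flatCur (cur : List (List Char)) : List Char :=
  if cur = [] then [] else PySem.Chars.join ['/'] cur ++ ['/']

/-- String-level version of `addsAc`, matching A's port literally. -/
def addsAs : List String → List String → List String
  | [], _ => []
  | p :: ps, cur => PySem.Str.join "/" (cur ++ [p]) :: addsAs ps (cur ++ [p])

theorem join_append_singleton (cur : List (List Char)) (p : List Char) :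
    PySem.Chars.join ['/'] (cur ++ [p]) = flatCur cur ++ p := by
  induction cur with
  | nil => simp [flatCur, PySem.Chars.join_singleton]
  | cons x t ih =>
    cases t with
    | nil =>
      rw [show ([x] ++ [p]) = [x, p] from rfl, PySem.Chars.join_cons_cons,
          PySem.Chars.join_singleton]
      simp [flatCur, PySem.Chars.join_singleton]
    | cons y t' =>
      rw [show ((x :: y :: t') ++ [p]) = x :: ((y :: t') ++ [p]) from rfl]
      rw [show (x :: ((y :: t') ++ [p])) = x :: y :: (t' ++ [p]) from rfl]
      rw [PySem.Chars.join_cons_cons]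
      rw [show (y :: (t' ++ [p])) = ((y :: t') ++ [p]) from rfl, ih]
      have h2 : flatCur (x :: y :: t') = x ++ ['/'] ++ flatCur (y :: t') := by
        simp [flatCur, PySem.Chars.join_cons_cons]
      rw [h2]
      simp [List.append_assoc]

theorem flatCur_append (cur : List (List Char)) (p : List Char) :
    flatCur (cur ++ [p]) = flatCur cur ++ p ++ ['/'] := by
  have h : flatCur (cur ++ [p]) = PySem.Chars.join ['/'] (cur ++ [p]) ++ ['/'] := by
    simp [flatCur]
  rw [h, join_append_singleton]

theorem splitSlash_ne_nil (cs : List Char) : ∀ (pre : List Char), splitSlash pre cs ≠ [] := by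
  induction cs with
  | nil => intro pre; simp [splitSlash]
  | cons c rest ih =>
    intro pre
    by_cases hc : c = '/' <;> simp [splitSlash, hc]
    exact ih _

/-- The core combinatorial fact: the strings A adds for one path equal its slash-position prefixes. -/
theorem addsAc_eq (cs : List Char) : ∀ (p : List Char) (cur : List (List Char)),
    addsAc ((splitSlash p cs).dropLast) cur
      = (slashIdx cs).map (fun i => flatCur cur ++ p ++ cs.take i) := by
  induction cs with
  | nil => intro p cur; simp [splitSlash, slashIdx, addsAc]
  | cons c rest ih =>
    intro p cur
    by_cases hc : c = '/'
    · subst hc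
      rw [show splitSlash p ('/' :: rest) = p :: splitSlash [] rest by simp [splitSlash]]
      rw [List.dropLast_cons_of_ne_nil (splitSlash_ne_nil rest [])]
      rw [show addsAc (p :: (splitSlash [] rest).dropLast) cur
            = PySem.Chars.join ['/'] (cur ++ [p])
              :: addsAc ((splitSlash [] rest).dropLast) (cur ++ [p]) from rfl]
      rw [ih [] (cur ++ [p]), join_append_singleton]
      rw [show slashIdx ('/' :: rest) = 0 :: (slashIdx rest).map (· + 1) by simp [slashIdx]]
      rw [List.map_cons, List.map_map]
      refine congrArg₂ List.cons ?_ ?_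
      · simp
      · apply List.map_congr_left
        intro i _
        simp [Function.comp, flatCur_append]
    · rw [show splitSlash p (c :: rest) = splitSlash (p ++ [c]) rest by simp [splitSlash, hc]]
      rw [ih (p ++ [c]) cur]
      rw [show slashIdx (c :: rest) = (slashIdx rest).map (· + 1) by simp [slashIdx, hc]]
      rw [List.map_map]
      apply List.map_congr_left
      intro i _
      simp [Function.comp]

-- splitOn.go with enough fuel and the single-char '/' separator is splitSlash.
theorem splitOn_go_eq (cs : List Char) : ∀ (fuel : Nat), cs.length < fuel →
    ∀ (cur : List Char) (acc : List (List Char)),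
    PySem.Chars.splitOn.go ['/'] fuel cs cur acc = acc.reverse ++ splitSlash cur.reverse cs := by
  induction cs with
  | nil =>
    intro fuel hf cur acc
    match fuel, hf with
    | fuel + 1, _ => simp [PySem.Chars.splitOn.go, splitSlash]
  | cons c rest ih =>
    intro fuel hf cur acc
    match fuel, hf with
    | fuel + 1, hf =>
      by_cases hc : c = '/'
      · subst hc
        rw [show PySem.Chars.splitOn.go ['/'] (fuel + 1) ('/' :: rest) cur acc
              = PySem.Chars.splitOn.go ['/'] fuel rest [] (cur.reverse :: acc) by
            simp [PySem.Chars.splitOn.go, List.isPrefixOf]]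
        rw [ih fuel (by simpa using Nat.lt_of_succ_lt_succ hf) [] (cur.reverse :: acc)]
        simp [splitSlash]
      · have hc' : ('/' = c) = False := by simp [eq_comm]; exact hc
        rw [show PySem.Chars.splitOn.go ['/'] (fuel + 1) (c :: rest) cur acc
              = PySem.Chars.splitOn.go ['/'] fuel rest (c :: cur) acc by
            simp [PySem.Chars.splitOn.go, List.isPrefixOf, hc']]
        rw [ih fuel (by simpa using Nat.lt_of_succ_lt_succ hf) (c :: cur) acc]
        simp [splitSlash, hc]

theorem splitOn_eq_splitSlash (cs : List Char) :
    PySem.Chars.splitOn cs ['/'] = splitSlash [] cs := by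
  unfold PySem.Chars.splitOn
  rw [splitOn_go_eq cs (cs.length + 1) (Nat.lt_succ_self _) [] []]
  simp

-- A's inner fold over the parts accumulates exactly `Set.update` with `addsAs`.
theorem foldA_eq_update (ps : List String) : ∀ (cur : List String) (s : PySem.Set String),
    ((ps.foldl
        (fun (st : List String × PySem.Set String) part =>
          let cur := st.1 ++ [part]
          (cur, PySem.Set.add st.2 (PySem.Str.join "/" cur)))
        (cur, s)).2) = PySem.Set.update s (addsAs ps cur) := by
  induction ps with
  | nil => intro cur s; simp [addsAs, PySem.Set.update]
  | cons p ps ih =>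
    intro cur s
    simp only [List.foldl_cons]
    rw [show addsAs (p :: ps) cur
          = PySem.Str.join "/" (cur ++ [p]) :: addsAs ps (cur ++ [p]) from rfl]
    exact ih (cur ++ [p]) _

-- B's conditional-add fold is `Set.update` over the filtered, mapped list.
theorem foldIf_eq_update (g : Int × Char → String) (l : List (Int × Char)) :
    ∀ (s : PySem.Set String),
    l.foldl (fun al p => if p.2 == '/' then PySem.Set.add al (g p) else al) s
      = PySem.Set.update s ((l.filter (fun p => p.2 == '/')).map g) := by
  induction l with
  | nil => intro s; simp [PySem.Set.update]
  | cons p l ih =>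
    intro s
    by_cases hp : p.2 == '/'
    · simp only [List.foldl_cons, List.filter_cons, hp]
      rw [ih]; rfl
    · simp only [List.foldl_cons, List.filter_cons]
      rw [if_neg (by simpa using hp)]
      simp only [Bool.not_eq_true] at hp
      simp only [hp, Bool.false_eq_true, if_false]
      exact ih s

theorem filter_enumerate_eq (cs : List Char) : ∀ (k : Int),
    (PySem.List.enumerate cs k).filter (fun p => p.2 == '/')
      = (slashIdx cs).map (fun (i : Nat) => ((k + i : Int), '/')) := by
  induction cs with
  | nil => intro k; simp [slashIdx, PySem.List.enumerate]
  | cons c rest ih =>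
    intro k
    rw [PySem.List.enumerate_cons]
    by_cases hc : c = '/'
    · subst hc
      rw [List.filter_cons, if_pos (show (((k, '/') : Int × Char).2 == '/') = true from rfl)]
      rw [show slashIdx ('/' :: rest) = 0 :: (slashIdx rest).map (· + 1) by simp [slashIdx]]
      rw [List.map_cons, List.map_map, ih (k + 1)]
      refine congrArg₂ List.cons (by simp) ?_
      apply List.map_congr_left
      intro i _
      simp only [Function.comp]
      refine congrArg₂ Prod.mk ?_ rfl
      push_cast; ring
    · rw [List.filter_cons, if_neg (by simp [hc])]
      rw [show slashIdx (c :: rest) = (slashIdx rest).map (· + 1) by simp [slashIdx, hc]]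
      rw [List.map_map, ih (k + 1)]
      apply List.map_congr_left
      intro i _
      simp only [Function.comp]
      refine congrArg₂ Prod.mk ?_ rfl
      push_cast; ring

-- addsAs on mapped char lists is addsAc.
theorem addsAs_map (cps : List (List Char)) : ∀ (cur : List (List Char)),
    addsAs (cps.map String.ofList) (cur.map String.ofList)
      = (addsAc cps cur).map String.ofList := by
  induction cps with
  | nil => intro cur; simp [addsAs, addsAc]
  | cons p ps ih =>
    intro cur
    simp only [List.map_cons]
    rw [show addsAs (String.ofList p :: ps.map String.ofList) (cur.map String.ofList)
          = PySem.Str.join "/" (cur.map String.ofList ++ [String.ofList p])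
            :: addsAs (ps.map String.ofList) (cur.map String.ofList ++ [String.ofList p]) from rfl]
    rw [show addsAc (p :: ps) cur
          = PySem.Chars.join ['/'] (cur ++ [p]) :: addsAc ps (cur ++ [p]) from rfl]
    rw [List.map_cons]
    refine congrArg₂ List.cons ?_ ?_
    · apply String.toList_injective
      rw [PySem.Str.toList_join, String.toList_ofList]
      rw [show (cur.map String.ofList ++ [String.ofList p])
            = ((cur ++ [p]).map String.ofList) by simp]
      rw [List.map_map]
      simp [Function.comp_def]
    · rw [show (cur.map String.ofList ++ [String.ofList p])
            = ((cur ++ [p]).map String.ofList) by simp]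
      exact ih (cur ++ [p])

-- The per-file bodies of the two ports agree on every set.
theorem inner_eq (f : String) (allowed : PySem.Set String) :
    (((PySem.Str.split? f "/").getD []).dropLast.foldl
        (fun (st : List String × PySem.Set String) part =>
          let cur := st.1 ++ [part]
          (cur, PySem.Set.add st.2 (PySem.Str.join "/" cur)))
        ([], allowed)).2
    = (PySem.List.enumerate f.toList 0).foldl
        (fun al (p : Int × Char) =>
          if p.2 == '/' then PySem.Set.add al (PySem.Str.slice f none (some p.1)) else al)
        allowed := by
  have hsplit : (PySem.Str.split? f "/").getD []
      = (splitSlash [] f.toList).map String.ofList := by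
    unfold PySem.Str.split? PySem.Chars.split?
    simp [splitOn_eq_splitSlash]
  rw [hsplit, ← List.map_dropLast, foldA_eq_update]
  rw [show ([] : List String) = (([] : List (List Char)).map String.ofList) from rfl]
  rw [addsAs_map, addsAc_eq, foldIf_eq_update, filter_enumerate_eq]
  congr 1
  simp only [List.map_map]
  apply List.map_congr_left
  intro i _
  simp only [Function.comp]
  apply String.toList_injective
  rw [PySem.Str.toList_slice, String.toList_ofList, PySem.Chars.slice_eq_listSlice]
  rw [show ((0 : Int) + (i : Int)) = ((i : Nat) : Int) by ring,
      PySem.List.slice_to_natCast]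
  simp [flatCur]

-- ===== VERDICT (by name: the statement is the Claim_ definition above) =====
theorem build_allowed_dirs_from_files_spec : Claim_equal_build_allowed_dirs_from_files := by
  intro files _
  show build_allowed_dirs_from_files files = build_allowed_dirs_from_files_alt files
  unfold build_allowed_dirs_from_files build_allowed_dirs_from_files_alt
  have main : ∀ (fs : List String) (s : PySem.Set String),
      fs.foldl
        (fun allowed f =>
          let parts := (PySem.Str.split? f "/").getD []
          ((PySem.List.slice parts none (some (-1))).foldl
            (fun (st : List String × PySem.Set String) part =>
              let cur := st.1 ++ [part]
              (cur, PySem.Set.add st.2 (PySem.Str.join "/" cur)))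
            ([], allowed)).2) s
      = fs.foldl
        (fun allowed f =>
          (PySem.List.enumerate f.toList 0).foldl
            (fun al (p : Int × Char) =>
              if p.2 == '/' then PySem.Set.add al (PySem.Str.slice f none (some p.1)) else al)
            allowed) s := by
    intro fs
    induction fs with
    | nil => intro s; rfl
    | cons f fs ih =>
      intro s
      simp only [List.foldl_cons]
      rw [PySem.List.slice_to_neg_one, inner_eq]
      exact ih _
  exact main files _
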